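-- pv_equiv track=rewrite | github.com/prncoprs/RVSpec | SpecSynthesis/ablation/query_mtl_no_cpg.py | is_valid_mtl
-- ===== SOURCE A (Python) =====
-- def is_valid_mtl(mtl_output: str) -> bool:
--     """Check if the MTL output is valid (not an error message)"""
--     if not mtl_output or mtl_output.strip() == "":
--         return False
--
--     # Check for common error patterns
--     error_patterns = [
--         "[Error:",
--         "Error:",
--         "I cannot",
--         "I can't",
--         "Unable to",
--         "Cannot generate",
--         "Failed to",
--         "No response",
--         "Invalid",
--         "Malformed"
--     ]
--
--     for pattern in error_patterns:
--         if pattern.lower() in mtl_output.lower():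
--             return False
--
--     return True
-- ===== SOURCE B (Python) =====
-- def is_valid_mtl(mtl_output: str) -> bool:
--     """Check if the MTL output is valid (not an error message)"""
--     if not mtl_output or mtl_output.strip() == "":
--         return False
--
--     # lowercased error patterns
--     patterns = [
--         "[error:",
--         "error:",
--         "i cannot",
--         "i can't",
--         "unable to",
--         "cannot generate",
--         "failed to",
--         "no response",
--         "invalid",
--         "malformed",
--     ]
--
--     low = mtl_output.lower()
--     # single left-to-right pass over the string: at each position test whether
--     # any error pattern starts there
--     for i in range(len(low)):
--         for p in patterns:
--             if low.startswith(p, i):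
--                 return False
--     return True
-- ===== Notes on version B (the rewrite author's own statement) =====
-- stated objective: alternative
-- what changed: Instead of k independent whole-string substring-membership scans, B lowercases once and makes a single left-to-right pass over the string, testing at each position whether any pre-lowercased error pattern starts there.
import Mathlib
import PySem

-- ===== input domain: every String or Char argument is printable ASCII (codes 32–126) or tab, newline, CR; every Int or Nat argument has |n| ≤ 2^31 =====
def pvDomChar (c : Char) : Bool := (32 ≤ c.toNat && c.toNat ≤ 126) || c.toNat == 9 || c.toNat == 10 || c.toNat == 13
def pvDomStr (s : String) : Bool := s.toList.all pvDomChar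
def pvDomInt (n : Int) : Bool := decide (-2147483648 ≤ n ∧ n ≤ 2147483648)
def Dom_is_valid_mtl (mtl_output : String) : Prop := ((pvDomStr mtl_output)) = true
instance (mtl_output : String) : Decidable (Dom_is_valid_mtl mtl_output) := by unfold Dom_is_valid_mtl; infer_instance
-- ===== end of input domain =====

-- B replaces A's k separate substring scans by one position-by-position pass testing every
-- pre-lowercased pattern with startswith; same values everywhere (objective: alternative).

-- ===== PORT A =====
-- A's error_patterns, verbatim
def aPatterns : List String :=
  ["[Error:", "Error:", "I cannot", "I can't", "Unable to", "Cannot generate",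
   "Failed to", "No response", "Invalid", "Malformed"]

-- the 'for pattern in error_patterns' loop: pattern.lower() in mtl_output.lower() → return False
def aLoop (s : String) : List String → Bool
  | [] => true
  | p :: rest =>
      if PySem.Chars.isIn (PySem.Chars.lower p.toList) (PySem.Chars.lower s.toList) then false
      else aLoop s rest

def is_valid_mtl (mtl_output : String) : Bool :=
  if mtl_output = "" || PySem.Str.strip mtl_output = "" then false
  else aLoop mtl_output aPatterns

-- ===== PORT B =====
-- Source B's pre-lowercased pattern literals, verbatim
def bPatterns : List (List Char) :=
  ["[error:".toList, "error:".toList, "i cannot".toList, "i can't".toList, "unable to".toList,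
   "cannot generate".toList, "failed to".toList, "no response".toList, "invalid".toList,
   "malformed".toList]

-- inner 'for p in patterns': low.startswith(p, i); exact here since 0 ≤ i ≤ len(low),
-- where Python's startswith-with-offset is startswith on the drop
def bInner (low : List Char) (i : Nat) : List (List Char) → Bool
  | [] => false
  | p :: rest =>
      if PySem.Chars.startswith (low.drop i) p then true else bInner low i rest

-- outer 'for i in range(len(low))'
def bOuter (low : List Char) : List Nat → Bool
  | [] => false
  | i :: rest => if bInner low i bPatterns then true else bOuter low rest

def is_valid_mtl_alt (mtl_output : String) : Bool :=
  if mtl_output = "" || PySem.Str.strip mtl_output = "" then false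
  else
    let low := PySem.Chars.lower mtl_output.toList
    !(bOuter low (List.range low.length))

-- ===== PRECONDITION & SPEC =====
def Spec_is_valid_mtl (mtl_output : String) (out : Bool) : Prop := out = is_valid_mtl_alt mtl_output
instance (mtl_output : String) (out : Bool) : Decidable (Spec_is_valid_mtl mtl_output out) := by unfold Spec_is_valid_mtl; infer_instance

-- ===== CLAIM (what is proved, stated in full; the proofs are below) =====
def Claim_equal_is_valid_mtl : Prop := ∀ (mtl_output : String), Dom_is_valid_mtl mtl_output → Spec_is_valid_mtl mtl_output (is_valid_mtl mtl_output)

-- ===== LEMMAS AND PROOFS =====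

lemma aLoop_eq_any (s : String) (ps : List String) :
    aLoop s ps =
      !(ps.any (fun p => PySem.Chars.isIn (PySem.Chars.lower p.toList) (PySem.Chars.lower s.toList))) := by
  induction ps with
  | nil => rfl
  | cons p rest ih => simp [aLoop, List.any_cons, ih]

lemma bInner_eq_any (low : List Char) (i : Nat) (qs : List (List Char)) :
    bInner low i qs = qs.any (fun q => PySem.Chars.startswith (low.drop i) q) := by
  induction qs with
  | nil => rfl
  | cons q rest ih => simp [bInner, List.any_cons, ih]

lemma bOuter_eq_any (low : List Char) (idxs : List Nat) :
    bOuter low idxs = idxs.any (fun i => bInner low i bPatterns) := by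
  induction idxs with
  | nil => rfl
  | cons i rest ih => simp [bOuter, List.any_cons, ih]

-- lowering A's pattern list gives B's literals
lemma lower_aPatterns : aPatterns.map (fun p => PySem.Chars.lower p.toList) = bPatterns := by decide

lemma bPatterns_ne_nil : ∀ q ∈ bPatterns, q ≠ [] := by decide

-- a nonempty pattern is a substring iff it starts at some position < length
lemma isIn_iff_exists_startswith (q low : List Char) (hq : q ≠ []) :
    PySem.Chars.isIn q low = true ↔
      ∃ i ∈ List.range low.length, PySem.Chars.startswith (low.drop i) q = true := by
  constructor
  · intro h
    obtain ⟨j, hj⟩ := (PySem.Chars.exists_prefix_drop_iff_isIn q low).mpr h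
    have hjlt : j < low.length := by
      by_contra hge
      have : low.drop j = [] := List.drop_eq_nil_of_le (by omega)
      rw [this] at hj
      exact hq (List.prefix_nil.mp hj)
    exact ⟨j, List.mem_range.mpr hjlt, (PySem.Chars.startswith_iff _ _).mpr hj⟩
  · rintro ⟨i, _, hi⟩
    exact (PySem.Chars.exists_prefix_drop_iff_isIn q low).mp
      ⟨i, (PySem.Chars.startswith_iff _ _).mp hi⟩

lemma loops_agree (s : String) :
    aLoop s aPatterns = !(bOuter (PySem.Chars.lower s.toList) (List.range (PySem.Chars.lower s.toList).length)) := by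
  set low := PySem.Chars.lower s.toList with hlow
  rw [aLoop_eq_any, bOuter_eq_any]
  congr 1
  have : aPatterns.any (fun p => PySem.Chars.isIn (PySem.Chars.lower p.toList) low)
       = bPatterns.any (fun q => PySem.Chars.isIn q low) := by
    rw [← lower_aPatterns, List.any_map]; rfl
  rw [this]
  rw [Bool.eq_iff_iff]
  simp only [List.any_eq_true]
  constructor
  · rintro ⟨q, hq, hin⟩
    obtain ⟨i, hi, hs⟩ := (isIn_iff_exists_startswith q low (bPatterns_ne_nil q hq)).mp hin
    exact ⟨i, hi, by rw [bInner_eq_any]; exact List.any_eq_true.mpr ⟨q, hq, hs⟩⟩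
  · rintro ⟨i, hi, hb⟩
    rw [bInner_eq_any] at hb
    obtain ⟨q, hq, hs⟩ := List.any_eq_true.mp hb
    exact ⟨q, hq, (isIn_iff_exists_startswith q low (bPatterns_ne_nil q hq)).mpr ⟨i, hi, hs⟩⟩

-- ===== VERDICT (by name: the statement is the Claim_ definition above) =====
theorem is_valid_mtl_spec : Claim_equal_is_valid_mtl := by
  intro s _
  unfold Spec_is_valid_mtl is_valid_mtl is_valid_mtl_alt
  split_ifs with h
  · rfl
  · exact loops_agree s
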